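-- pv_equiv track=rewrite | github.com/EdinburghNLP/ACES | challenge_set_creation/mistranslation/other/perturb-modals.py | filter_modal_verbs
-- ===== SOURCE A (Python) =====
-- english_modal_verbs = ["must", "may", "might", "could"]
--
-- def filter_modal_verbs(en_sentences, de_sentences):
--     """
--     Extract de-en sentence pairs where the en reference sentence contains a modal verb from the list english_modal_verbs
--     :param en_sentences: en sentences (list)
--     :param de_sentences: de sentences (list)
--     :return: filtered sentence pairs
--     """
--     filtered_sentences = {}
--     for sent_num in en_sentences:
--         en_sentence = en_sentences[sent_num]
--         count_modal_verbs = 0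
--         for modal_verb in english_modal_verbs:
--             count_modal_verbs += en_sentence.split().count(modal_verb)
--         # For simplicity, consider only sentences with a single (en) modal verb
--         if count_modal_verbs == 1:
--             de_sentence = de_sentences[sent_num]
--             # Filter out sentences where double quotes are present in the source / reference
--             if not "\"" in de_sentence and not "\"" in en_sentence \
--                 and not "“" in de_sentence and not "“" in en_sentence:
--                 filtered_sentences[sent_num] = {"reference": en_sentence,
--                                                 "source": de_sentence}
--     return filtered_sentences
-- ===== SOURCE B (Python) =====
-- english_modal_verbs = ["must", "may", "might", "could"]
--
--
-- def _exactly_one_modal(words):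
--     """Early-exit check: locate the FIRST modal word recursively; succeed only
--     if the remainder of the word list is modal-free.  No counting is done."""
--     if not words:
--         return False
--     head, rest = words[0], words[1:]
--     if head in english_modal_verbs:
--         return all(w not in english_modal_verbs for w in rest)
--     return _exactly_one_modal(rest)
--
--
-- def filter_modal_verbs(en_sentences, de_sentences):
--     """Two-stage pipeline: first select candidate English sentences by the
--     early-exit exactly-one-modal test, then join with the German side and
--     drop any pair containing a double quote."""
--     candidates = [(k, s) for k, s in en_sentences.items()
--                   if _exactly_one_modal(s.split())]
--     out = {}
--     for k, en in candidates:
--         de = de_sentences[k]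
--         if all(q not in en and q not in de for q in ('"', '\u201c')):
--             out[k] = {"reference": en, "source": de}
--     return out
-- ===== Notes on version B (the rewrite author's own statement) =====
-- stated objective: alternative
-- what changed: B replaces A's summed per-modal count test by an early-exit recursive check (find the first modal word, then verify the tail is modal-free) and splits the single loop into a two-stage pipeline: a candidate-selection comprehension over the English side followed by a join/quote-filter loop over the candidates.
import Mathlib
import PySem

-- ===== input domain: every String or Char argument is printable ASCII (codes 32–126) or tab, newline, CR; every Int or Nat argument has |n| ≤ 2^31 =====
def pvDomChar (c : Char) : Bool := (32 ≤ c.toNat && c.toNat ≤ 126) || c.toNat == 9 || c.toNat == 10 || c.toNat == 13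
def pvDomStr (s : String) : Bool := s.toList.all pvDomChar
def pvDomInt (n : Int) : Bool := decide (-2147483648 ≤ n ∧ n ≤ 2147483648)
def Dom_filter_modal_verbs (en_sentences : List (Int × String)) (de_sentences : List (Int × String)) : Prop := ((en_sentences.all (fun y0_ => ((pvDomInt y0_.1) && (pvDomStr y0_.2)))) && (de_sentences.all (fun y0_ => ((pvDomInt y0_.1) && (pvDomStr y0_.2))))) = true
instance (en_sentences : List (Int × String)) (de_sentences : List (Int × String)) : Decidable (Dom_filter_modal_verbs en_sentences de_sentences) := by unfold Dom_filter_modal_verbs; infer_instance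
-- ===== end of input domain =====

-- B replaces A's summed per-modal counts by an early-exit "first modal then modal-free
-- tail" recursion and stages the work as candidate selection followed by a join/filter
-- loop (objective: alternative; same asymptotic cost).

-- ===== PORT A =====
def english_modal_verbs : List String := ["must", "may", "might", "could"]

def filter_modal_verbs (en_sentences : List (Int × String)) (de_sentences : List (Int × String)) : List (Int × List (String × String)) :=
  ((en_sentences.map (·.1)).foldl
    (fun (filtered_sentences : PySem.Dict Int (List (String × String))) sent_num =>
      let en_sentence := (PySem.Dict.mk en_sentences).getD sent_num ""
      let count_modal_verbs : Int := english_modal_verbs.foldl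
        (fun c modal_verb => c + ((PySem.Str.split₀ en_sentence).count modal_verb : Int)) 0
      if count_modal_verbs == 1 then
        let de_sentence := (PySem.Dict.mk de_sentences).getD sent_num ""
        if !(PySem.Str.isIn "\"" de_sentence) && !(PySem.Str.isIn "\"" en_sentence)
            && !(PySem.Str.isIn "“" de_sentence) && !(PySem.Str.isIn "“" en_sentence) then
          filtered_sentences.insert sent_num
            [("reference", en_sentence), ("source", de_sentence)]
        else filtered_sentences
      else filtered_sentences)
    PySem.Dict.empty).items

-- ===== PORT B =====
-- port of Source B's recursive early-exit helper _exactly_one_modal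
def exactlyOneModal : List String → Bool
  | [] => false
  | head :: rest =>
      if english_modal_verbs.contains head then
        rest.all (fun w => !(english_modal_verbs.contains w))
      else exactlyOneModal rest

def filter_modal_verbs_alt (en_sentences : List (Int × String)) (de_sentences : List (Int × String)) : List (Int × List (String × String)) :=
  let candidates := ((PySem.Dict.mk en_sentences).items).filter
    (fun kv => exactlyOneModal (PySem.Str.split₀ kv.2))
  (candidates.foldl
    (fun (out : PySem.Dict Int (List (String × String))) kv =>
      let de := (PySem.Dict.mk de_sentences).getD kv.1 ""
      if (["\"", "“"] : List String).all
          (fun q => !(PySem.Str.isIn q kv.2) && !(PySem.Str.isIn q de)) then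
        out.insert kv.1 [("reference", kv.2), ("source", de)]
      else out)
    PySem.Dict.empty).items

-- ===== PRECONDITION & SPEC =====
-- Pre_ excludes assoc lists whose en keys repeat (not representable as a Python dict, so
-- first-match lookup order is accidental) and inputs where an en sentence with exactly one
-- modal word has a key absent from de_sentences: exactly there A (and B) raise KeyError.
def Pre_filter_modal_verbs (en_sentences : List (Int × String)) (de_sentences : List (Int × String)) : Prop :=
  (en_sentences.map (·.1)).Nodup ∧
  ∀ kv ∈ en_sentences,
    (PySem.Str.split₀ kv.2).countP (fun w => w ∈ ["must", "may", "might", "could"]) = 1 →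
      kv.1 ∈ de_sentences.map (·.1)
instance (en_sentences : List (Int × String)) (de_sentences : List (Int × String)) : Decidable (Pre_filter_modal_verbs en_sentences de_sentences) := by unfold Pre_filter_modal_verbs; infer_instance

def pvWitness_filter_modal_verbs : (List (Int × String)) × (List (Int × String)) :=
  ([(1, "he must go"), (2, "may be \"fine\"")], [(1, "er muss gehen"), (2, "mag sein")])

def Spec_filter_modal_verbs (en_sentences : List (Int × String)) (de_sentences : List (Int × String)) (out : List (Int × List (String × String))) : Prop := out = filter_modal_verbs_alt en_sentences de_sentences
instance (en_sentences : List (Int × String)) (de_sentences : List (Int × String)) (out : List (Int × List (String × String))) : Decidable (Spec_filter_modal_verbs en_sentences de_sentences out) := by unfold Spec_filter_modal_verbs; infer_instance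

-- ===== CLAIM (what is proved, stated in full; the proofs are below) =====
def Claim_equal_filter_modal_verbs : Prop := ∀ (en_sentences : List (Int × String)) (de_sentences : List (Int × String)), Dom_filter_modal_verbs en_sentences de_sentences → Pre_filter_modal_verbs en_sentences de_sentences → Spec_filter_modal_verbs en_sentences de_sentences (filter_modal_verbs en_sentences de_sentences)

-- ===== LEMMAS AND PROOFS =====

-- A's summed per-modal counts equal the membership count.
theorem modal_count_eq_countP (ws : List String) :
    english_modal_verbs.foldl (fun c m => c + ((ws.count m : Int))) 0
      = (ws.countP (fun w => english_modal_verbs.contains w) : Int) := by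
  induction ws with
  | nil => decide
  | cons w t ih =>
    simp only [List.count_cons, List.countP_cons, english_modal_verbs, List.foldl] at *
    by_cases h1 : w = "must" <;> by_cases h2 : w = "may" <;>
      by_cases h3 : w = "might" <;> by_cases h4 : w = "could" <;>
      simp_all [List.contains_eq_mem] <;> omega

-- a modal-free tail is one with membership count zero
theorem all_no_modal_eq (t : List String) :
    (t.all fun w => !(english_modal_verbs.contains w))
      = (t.countP (fun w => english_modal_verbs.contains w) == 0) := by
  induction t with
  | nil => decide
  | cons x s ih =>
    simp only [List.all_cons, List.countP_cons, ih]
    by_cases hx : x ∈ english_modal_verbs <;> simp [hx]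

-- B's early-exit check holds exactly when the membership count is one.
theorem exactlyOneModal_eq (ws : List String) :
    exactlyOneModal ws = (ws.countP (fun w => english_modal_verbs.contains w) == 1) := by
  induction ws with
  | nil => decide
  | cons w t ih =>
    rw [exactlyOneModal, List.countP_cons]
    by_cases h : w ∈ english_modal_verbs
    · rw [if_pos (by simpa using h), all_no_modal_eq]
      cases hc : t.countP (fun w => english_modal_verbs.contains w) <;> simp_all
    · rw [if_neg (by simpa using h), ih]
      simp [h]

-- ===== VERDICT (by name: the statement is the Claim_ definition above) =====
theorem filter_modal_verbs_spec : Claim_equal_filter_modal_verbs := by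
  intro en de _hdom hpre
  unfold Spec_filter_modal_verbs
  obtain ⟨hnd, _⟩ := hpre
  simp only [filter_modal_verbs, filter_modal_verbs_alt]
  rw [List.foldl_map, ← PySem.List.foldl_if_eq_foldl_filter]
  refine congrArg PySem.Dict.items (PySem.List.foldl_congr_mem en _ _ _ ?_)
  intro acc kv hkv
  have hget : (PySem.Dict.mk en).get? kv.1 = some kv.2 := by
    apply PySem.Dict.get?_of_mem_items
    · simpa using hkv
    · simpa [PySem.Dict.keys] using hnd
  have hgetD : (PySem.Dict.mk en).getD kv.1 "" = kv.2 :=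
    PySem.Dict.getD_of_get?_eq_some _ "" hget
  simp only [hgetD, modal_count_eq_countP, exactlyOneModal_eq]
  norm_num [List.all_cons]
  split_ifs <;> first | rfl | (exfalso; tauto)
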